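-- pv_equiv track=rewrite | github.com/Nghia03092004/nghia03092004.github.io | project_euler/problem_923/solution.py | count_brute
-- ===== SOURCE A (Python) =====
-- def count_brute(N):
--     """Count G(n) = 0 by iterating and computing running XOR."""
--     count = 0
--     xor_val = 0
--     for n in range(1, N + 1):
--         xor_val ^= n
--         if xor_val == 0:
--             count += 1
--     return count
-- ===== SOURCE B (Python) =====
-- def count_brute(N):
--     """Count G(n) = 0: XOR(1..n) = 0 iff n % 4 == 3, so it's a closed form."""
--     return max(0, (N + 1) // 4)
-- ===== Notes on version B (the rewrite author's own statement) =====
-- stated objective: faster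
-- what changed: Replaced the O(N) running-XOR loop by the closed form max(0, (N+1)//4), using that XOR(1..n)=0 exactly when n % 4 == 3.
import Mathlib
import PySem

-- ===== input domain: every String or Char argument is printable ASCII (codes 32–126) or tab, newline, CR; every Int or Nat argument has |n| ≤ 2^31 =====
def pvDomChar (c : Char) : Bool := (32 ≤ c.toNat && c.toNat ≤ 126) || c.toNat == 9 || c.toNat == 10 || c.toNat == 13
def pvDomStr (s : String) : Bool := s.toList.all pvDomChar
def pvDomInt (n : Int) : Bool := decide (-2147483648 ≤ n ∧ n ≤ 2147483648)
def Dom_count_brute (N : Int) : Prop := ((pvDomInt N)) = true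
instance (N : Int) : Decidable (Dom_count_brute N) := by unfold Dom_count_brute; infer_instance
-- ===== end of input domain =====

-- B replaces A's O(N) running-XOR loop with the O(1) closed form max(0, (N+1)//4).

-- ===== PORT A =====
def count_brute (N : Int) : Int :=
  ((PySem.List.pyRange 1 (N + 1) 1).foldl
    (fun st n =>
      let x := PySem.Int.bxor st.2 n
      (if x = 0 then st.1 + 1 else st.1, x))
    (0, 0)).1

-- ===== PORT B =====
def count_brute_alt (N : Int) : Int :=
  max 0 (PySem.Int.floordiv (N + 1) 4)

-- ===== PRECONDITION & SPEC =====
def Spec_count_brute (N : Int) (out : Int) : Prop := out = count_brute_alt N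
instance (N : Int) (out : Int) : Decidable (Spec_count_brute N out) := by unfold Spec_count_brute; infer_instance

-- ===== CLAIM (what is proved, stated in full; the proofs are below) =====
def Claim_equal_count_brute : Prop := ∀ (N : Int), Dom_count_brute N → Spec_count_brute N (count_brute N)

-- ===== LEMMAS AND PROOFS =====

-- Closed form for the running XOR value after processing 1..m.
def xcl (m : Nat) : Nat :=
  if m % 4 = 0 then m else if m % 4 = 1 then 1 else if m % 4 = 2 then m + 1 else 0

lemma loop_inv (m : Nat) :
    (PySem.List.pyRange 1 ((m : Int) + 1) 1).foldl
      (fun st n =>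
        let x := PySem.Int.bxor st.2 n
        (if x = 0 then st.1 + 1 else st.1, x))
      (0, 0) = ((((m + 1) / 4 : Nat) : Int), ((xcl m : Nat) : Int)) := by
  induction m with
  | zero =>
    rw [PySem.List.pyRange_one_eq_nil (by norm_num)]
    simp [xcl]
  | succ m ih =>
    rw [show ((m + 1 : Nat) : Int) + 1 = ((m : Int) + 1) + 1 by push_cast; ring,
        PySem.List.pyRange_one_succ_right (by omega), List.foldl_append, ih]
    simp only [List.foldl_cons, List.foldl_nil]
    have hx : PySem.Int.bxor ((xcl m : Nat) : Int) ((m : Int) + 1)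
        = ((xcl m ^^^ (m + 1) : Nat) : Int) := by
      rw [show ((m : Int) + 1) = ((m + 1 : Nat) : Int) by push_cast; ring]
      exact PySem.Int.bxor_natCast _ _
    rcases (by omega : m % 4 = 0 ∨ m % 4 = 1 ∨ m % 4 = 2 ∨ m % 4 = 3) with h | h | h | h
    · -- xcl m = m, m even; m ^^^ (m+1) = 1
      have he : Even m := Nat.even_iff.mpr (by omega)
      have : xcl m ^^^ (m + 1) = 1 := by
        rw [xcl, if_pos h, ← Nat.xor_one_of_even he, Nat.xor_xor_cancel_left]
      simp only [hx, this]
      have : xcl (m + 1) = 1 := by rw [xcl, if_neg (by omega), if_pos (by omega)]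
      rw [this, if_neg (by norm_num), Prod.mk.injEq]
      exact ⟨by rw [show ((m + 1 + 1) / 4 : Nat) = (m + 1) / 4 from by omega], by norm_num⟩
    · -- xcl m = 1, m+1 even; 1 ^^^ (m+1) = m+2
      have he : Even (m + 1) := Nat.even_iff.mpr (by omega)
      have : xcl m ^^^ (m + 1) = m + 2 := by
        rw [xcl, if_neg (by omega), if_pos h, Nat.xor_comm, Nat.xor_one_of_even he]
      simp only [hx, this]
      have hc : xcl (m + 1) = m + 2 := by rw [xcl, if_neg (by omega), if_neg (by omega), if_pos (by omega)]
      rw [if_neg (by exact_mod_cast (by omega : ((m + 2 : Nat) : Int) ≠ 0)), hc, Prod.mk.injEq]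
      exact ⟨by rw [show ((m + 1 + 1) / 4 : Nat) = (m + 1) / 4 from by omega], rfl⟩
    · -- xcl m = m+1; (m+1) ^^^ (m+1) = 0, count increments
      have : xcl m ^^^ (m + 1) = 0 := by
        rw [xcl, if_neg (by omega), if_neg (by omega), if_pos h, Nat.xor_self]
      simp only [hx, this]
      have hc : xcl (m + 1) = 0 := by rw [xcl, if_neg (by omega), if_neg (by omega), if_neg (by omega)]
      rw [if_pos (by norm_num), hc, Prod.mk.injEq]
      refine ⟨?_, by norm_num⟩
      rw [show ((m + 1 + 1) / 4 : Nat) = (m + 1) / 4 + 1 from by omega]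
      push_cast; ring
    · -- xcl m = 0; 0 ^^^ (m+1) = m+1
      have : xcl m ^^^ (m + 1) = m + 1 := by
        rw [xcl, if_neg (by omega), if_neg (by omega), if_neg (by omega), Nat.zero_xor]
      simp only [hx, this]
      have hc : xcl (m + 1) = m + 1 := by rw [xcl, if_pos (by omega)]
      rw [if_neg (by exact_mod_cast (by omega : ((m + 1 : Nat) : Int) ≠ 0)), hc, Prod.mk.injEq]
      exact ⟨by rw [show ((m + 1 + 1) / 4 : Nat) = (m + 1) / 4 from by omega], rfl⟩

-- ===== VERDICT (by name: the statement is the Claim_ definition above) =====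
theorem count_brute_spec : Claim_equal_count_brute := by
  intro N _
  unfold Spec_count_brute count_brute count_brute_alt
  rcases le_or_gt N 0 with hN | hN
  · rw [PySem.List.pyRange_one_eq_nil (by omega)]
    rw [PySem.Int.floordiv_eq_ediv_of_pos (by norm_num)]
    simp only [List.foldl_nil]
    omega
  · obtain ⟨m, rfl⟩ : ∃ m : Nat, N = (m : Int) := ⟨N.toNat, by omega⟩
    rw [loop_inv m]
    rw [show (m : Int) + 1 = ((m + 1 : Nat) : Int) by push_cast; ring,
        show (4 : Int) = ((4 : Nat) : Int) by norm_num,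
        PySem.Int.floordiv_natCast]
    simp only []
    omega
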